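-- pv_equiv track=rewrite | github.com/edmundmiller/dotfiles | packages/hermes-dcp/hermes_dcp/engine.py | _turns_after
-- ===== SOURCE A (Python) =====
-- from typing import Any, TYPE_CHECKING
--
-- def _turns_after(messages: list[dict[str, Any]]) -> list[int]:
--     user_prefix: list[int] = []
--     total = 0
--     for m in messages:
--         if m.get("role") == "user":
--             total += 1
--         user_prefix.append(total)
--     return [max(0, total - seen) for seen in user_prefix]
-- ===== SOURCE B (Python) =====
-- def _turns_after(messages: list[dict[str, any]]) -> list[int]:
--     users = [i for i, m in enumerate(messages) if m.get("role") == "user"]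
--     k = len(users)
--     out = []
--     j = 0
--     for i, _m in enumerate(messages):
--         if j < k and users[j] == i:
--             j += 1
--         out.append(k - j)
--     return out
-- ===== Notes on version B (the rewrite author's own statement) =====
-- stated objective: alternative
-- what changed: B precomputes the sorted list of user-message indices once, then answers each position by a merge-scan pointer into that index list (k - j), replacing A's running prefix-count array plus total followed by a subtracting second pass.
import Mathlib
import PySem

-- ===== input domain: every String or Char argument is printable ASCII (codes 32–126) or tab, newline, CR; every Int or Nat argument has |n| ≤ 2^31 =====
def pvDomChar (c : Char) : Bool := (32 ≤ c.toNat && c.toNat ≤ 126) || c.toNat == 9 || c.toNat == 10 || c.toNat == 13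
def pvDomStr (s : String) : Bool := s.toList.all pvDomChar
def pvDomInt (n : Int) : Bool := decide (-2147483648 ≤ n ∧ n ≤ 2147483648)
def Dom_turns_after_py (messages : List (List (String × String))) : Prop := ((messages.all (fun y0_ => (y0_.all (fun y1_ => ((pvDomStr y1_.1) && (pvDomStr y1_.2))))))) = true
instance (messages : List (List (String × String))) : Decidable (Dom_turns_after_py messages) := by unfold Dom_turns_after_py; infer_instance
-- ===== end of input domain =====

-- B precomputes the list of user-message indices and answers each position by a
-- merge-scan pointer into that list, instead of A's prefix-count array + subtracting pass
-- (objective: alternative; same O(n) cost).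


-- m.get("role"): Python dict.get, shared by both Pythons (both call m.get("role"))
def pvRole (m : List (String × String)) : Option String := (PySem.Dict.mk m).get? "role"

-- ===== PORT A =====
-- forward loop building user_prefix and total, then the subtracting comprehension
def turns_after_py (messages : List (List (String × String))) : List Int :=
  let st := messages.foldl
    (fun (acc : List Int × Int) m =>
      let total := if pvRole m = some "user" then acc.2 + 1 else acc.2
      (acc.1 ++ [total], total))
    ([], 0)
  st.1.map (fun seen => max 0 (st.2 - seen))

-- ===== PORT B =====
-- comprehension over enumerate(messages), then a merge-scan with pointer j into the
-- index list; users[j] is short-circuit guarded by j < k, so pyGetD's default is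
-- never the value the condition depends on (exact Python semantics)
def turns_after_py_alt (messages : List (List (String × String))) : List Int :=
  let users : List Int :=
    ((PySem.List.enumerate messages 0).filter
      (fun p => pvRole p.2 = some "user")).map (fun p => p.1)
  let k : Int := (users.length : Int)
  let st := (PySem.List.enumerate messages 0).foldl
    (fun (acc : List Int × Int) p =>
      let j := if acc.2 < k ∧ PySem.List.pyGetD users acc.2 0 = p.1
               then acc.2 + 1 else acc.2
      (acc.1 ++ [k - j], j))
    ([], 0)
  st.1

-- ===== PRECONDITION & SPEC =====
def Spec_turns_after_py (messages : List (List (String × String))) (out : List Int) : Prop := out = turns_after_py_alt messages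
instance (messages : List (List (String × String))) (out : List Int) : Decidable (Spec_turns_after_py messages out) := by unfold Spec_turns_after_py; infer_instance

-- ===== CLAIM (what is proved, stated in full; the proofs are below) =====
def Claim_equal_turns_after_py : Prop := ∀ (messages : List (List (String × String))), Dom_turns_after_py messages → Spec_turns_after_py messages (turns_after_py messages)

-- ===== LEMMAS AND PROOFS =====

-- u m = 1 if m is a user message else 0
def pvU (m : List (String × String)) : Int := if pvRole m = some "user" then 1 else 0

def pvSumU (ms : List (List (String × String))) : Int := (ms.map pvU).sum

-- prefix list of A's loop starting at counter t
def pvPrefA (t : Int) : List (List (String × String)) → List Int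
  | [] => []
  | m :: ms => (t + pvU m) :: pvPrefA (t + pvU m) ms

-- index list of the user messages when enumeration starts at i
def pvUsersFrom (i : Int) : List (List (String × String)) → List Int
  | [] => []
  | m :: ms => if pvRole m = some "user" then i :: pvUsersFrom (i + 1) ms
               else pvUsersFrom (i + 1) ms

-- the common reference value: suffix counts of user messages
def pvT : List (List (String × String)) → List Int
  | [] => []
  | _ :: ms => pvSumU ms :: pvT ms

lemma pvSumU_nonneg (ms : List (List (String × String))) : 0 ≤ pvSumU ms := by
  induction ms with
  | nil => simp [pvSumU]
  | cons m ms ih =>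
    simp only [pvSumU, List.map_cons, List.sum_cons] at *
    have : (0 : Int) ≤ pvU m := by unfold pvU; split <;> omega
    omega

-- ===== A-side =====

lemma foldA_spec (ms : List (List (String × String))) (l : List Int) (t : Int) :
    ms.foldl (fun (acc : List Int × Int) m =>
      let total := if pvRole m = some "user" then acc.2 + 1 else acc.2
      (acc.1 ++ [total], total)) (l, t) = (l ++ pvPrefA t ms, t + pvSumU ms) := by
  induction ms generalizing l t with
  | nil => simp [pvPrefA, pvSumU]
  | cons m ms ih =>
    rw [List.foldl_cons]
    have h : (let total := if pvRole m = some "user" then (l, t).2 + 1 else (l, t).2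
              ((l, t).1 ++ [total], total)) = (l ++ [t + pvU m], t + pvU m) := by
      simp only [pvU]; split <;> simp
    rw [h, ih]
    simp only [pvPrefA, pvSumU, List.map_cons, List.sum_cons, Prod.mk.injEq]
    exact ⟨by simp, by ring⟩

lemma pvPrefA_shift (ms : List (List (String × String))) (t : Int) :
    pvPrefA t ms = (pvPrefA 0 ms).map (fun s => t + s) := by
  induction ms generalizing t with
  | nil => simp [pvPrefA]
  | cons m ms ih =>
    simp only [pvPrefA, List.map_cons, zero_add]
    congr 1
    rw [ih (t + pvU m), ih (pvU m), List.map_map]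
    apply List.map_congr_left
    intro s _
    simp only [Function.comp_apply]
    ring

lemma A_eq_T (ms : List (List (String × String))) : turns_after_py ms = pvT ms := by
  induction ms with
  | nil => simp [turns_after_py, pvT]
  | cons m ms ih =>
    unfold turns_after_py at *
    rw [foldA_spec] at *
    simp only [List.nil_append] at *
    simp only [pvPrefA, pvT, List.map_cons, pvSumU, List.sum_cons, zero_add]
    have hnn := pvSumU_nonneg ms
    simp only [pvSumU] at hnn
    congr 1
    · omega
    · rw [pvPrefA_shift ms (pvU m), List.map_map, ← ih]
      apply List.map_congr_left
      intro s _
      simp only [Function.comp_apply, pvSumU]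
      congr 1
      ring

-- ===== B-side =====

lemma usersFrom_eq (ms : List (List (String × String))) (i : Int) :
    ((PySem.List.enumerate ms i).filter
      (fun p => pvRole p.2 = some "user")).map (fun p => p.1) = pvUsersFrom i ms := by
  induction ms generalizing i with
  | nil => simp [PySem.List.enumerate_nil, pvUsersFrom]
  | cons m ms ih =>
    rw [PySem.List.enumerate_cons]
    simp only [List.filter_cons, pvUsersFrom]
    split <;> simp_all

lemma len_usersFrom (ms : List (List (String × String))) (i : Int) :
    ((pvUsersFrom i ms).length : Int) = pvSumU ms := by
  induction ms generalizing i with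
  | nil => simp [pvUsersFrom, pvSumU]
  | cons m ms ih =>
    simp only [pvUsersFrom, pvSumU, List.map_cons, List.sum_cons, pvU]
    split <;> simp_all [pvSumU]; omega

lemma mem_usersFrom_ge (ms : List (List (String × String))) (i x : Int)
    (hx : x ∈ pvUsersFrom i ms) : i ≤ x := by
  induction ms generalizing i with
  | nil => simp [pvUsersFrom] at hx
  | cons m ms ih =>
    simp only [pvUsersFrom] at hx
    split at hx
    · rcases List.mem_cons.1 hx with h | h
      · omega
      · have := ih (i + 1) h; omega
    · have := ih (i + 1) hx; omega

lemma foldB_spec (users : List Int) (ms : List (List (String × String))) (i : Int)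
    (pre l : List Int) (h : users = pre ++ pvUsersFrom i ms) :
    (PySem.List.enumerate ms i).foldl
      (fun (acc : List Int × Int) p =>
        let j := if acc.2 < (users.length : Int) ∧
                    PySem.List.pyGetD users acc.2 0 = p.1
                 then acc.2 + 1 else acc.2
        (acc.1 ++ [(users.length : Int) - j], j))
      (l, (pre.length : Int))
    = (l ++ pvT ms, (users.length : Int)) := by
  induction ms generalizing i pre l with
  | nil =>
    simp [PySem.List.enumerate_nil, pvT, h]
  | cons m ms ih =>
    rw [PySem.List.enumerate_cons, List.foldl_cons]
    have hget : PySem.List.pyGetD users ((pre.length : Int)) 0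
        = (pvUsersFrom i (m :: ms)).getD 0 0 := by
      rw [PySem.List.pyGetD_natCast, h]
      cases hu : pvUsersFrom i (m :: ms) with
      | nil => simp [List.getD]
      | cons a rest =>
        simp [List.getD]
    by_cases hm : pvRole m = some "user"
    · -- user message: pointer advances
      have hu : pvUsersFrom i (m :: ms) = i :: pvUsersFrom (i + 1) ms := by
        simp [pvUsersFrom, hm]
      have hk : (users.length : Int) = pre.length + 1 + (pvUsersFrom (i + 1) ms).length := by
        rw [h, hu]; simp; omega
      have hcond : ((pre.length : Int) < (users.length : Int) ∧
          PySem.List.pyGetD users ((pre.length : Int)) 0 = i) := by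
        constructor
        · omega
        · rw [hget, hu]; simp [List.getD]
      rw [if_pos hcond]
      have h' : users = (pre ++ [i]) ++ pvUsersFrom (i + 1) ms := by
        rw [h, hu]; simp
      have hih := ih (i + 1) (pre ++ [i]) (l ++ [(users.length : Int) - ((pre.length : Int) + 1)]) h'
      simp only [List.length_append, List.length_cons, List.length_nil, Nat.cast_add,
        Nat.cast_one, zero_add] at hih
      simp only []
      rw [hih]
      have hs : (users.length : Int) - ((pre.length : Int) + 1) = pvSumU ms := by
        have hl := len_usersFrom ms (i + 1)
        omega
      simp only [pvT, hs, List.append_assoc, List.singleton_append]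
    · -- non-user message: pointer stays
      have hu : pvUsersFrom i (m :: ms) = pvUsersFrom (i + 1) ms := by
        simp [pvUsersFrom, hm]
      have hcond : ¬ ((pre.length : Int) < (users.length : Int) ∧
          PySem.List.pyGetD users ((pre.length : Int)) 0 = i) := by
        rintro ⟨hlt, heq⟩
        rw [hget, hu] at heq
        cases hrest : pvUsersFrom (i + 1) ms with
        | nil =>
          rw [h, hu, hrest] at hlt; simp at hlt
        | cons a rest =>
          rw [hrest] at heq
          simp [List.getD] at heq
          have : i + 1 ≤ a := mem_usersFrom_ge ms (i + 1) a (by rw [hrest]; exact List.mem_cons_self ..)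
          omega
      rw [if_neg hcond]
      have h' : users = pre ++ pvUsersFrom (i + 1) ms := by rw [h, hu]
      have hih := ih (i + 1) pre (l ++ [(users.length : Int) - (pre.length : Int)]) h'
      rw [hih]
      have hs : (users.length : Int) - (pre.length : Int) = pvSumU ms := by
        have hl := len_usersFrom ms (i + 1)
        have : (users.length : Int) = pre.length + (pvUsersFrom (i+1) ms).length := by
          rw [h']; push_cast [List.length_append]; ring
        omega
      simp only [pvT, hs, List.append_assoc, List.singleton_append]

lemma B_eq_T (ms : List (List (String × String))) : turns_after_py_alt ms = pvT ms := by
  unfold turns_after_py_alt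
  simp only []
  rw [usersFrom_eq ms 0]
  have hfb := foldB_spec (pvUsersFrom 0 ms) ms 0 [] [] (by simp)
  simp only [List.length_nil, Nat.cast_zero] at hfb
  rw [hfb]
  simp

-- ===== VERDICT (by name: the statement is the Claim_ definition above) =====
theorem turns_after_py_spec : Claim_equal_turns_after_py := by
  intro ms _
  unfold Spec_turns_after_py
  rw [A_eq_T, B_eq_T]
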